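-- pv_equiv track=rewrite | github.com/shatayu/SportsClips | binary_search_game_time.py | compute_game_elapsed
-- ===== SOURCE A (Python) =====
-- from typing import Dict, List, Optional, Tuple, Union
--
-- def quarter_order(quarter: str) -> int:
--     if quarter == "OT":
--         return 5
--     if quarter and quarter.startswith("Q") and len(quarter) == 2 and quarter[1] in "1234":
--         return int(quarter[1])
--     return 0
--
-- def quarter_duration_seconds(quarter: str) -> int:
--     if quarter == "OT":
--         return 10 * 60
--     return 15 * 60
--
-- def compute_game_elapsed(quarter: Optional[str], game_clock_sec: Optional[int]) -> Optional[int]: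
--     if not quarter or game_clock_sec is None:
--         return None
--     q_idx = quarter_order(quarter)
--     if q_idx == 0:
--         return None
--     elapsed_prior = 0
--     for i in range(1, q_idx):
--         elapsed_prior += quarter_duration_seconds(f"Q{i}")
--     elapsed_this = quarter_duration_seconds(quarter) - game_clock_sec
--     return elapsed_prior + max(0, elapsed_this)
-- ===== SOURCE B (Python) =====
-- from typing import Optional
--
-- def compute_game_elapsed(quarter: Optional[str], game_clock_sec: Optional[int]) -> Optional[int]:
--     # Direct arithmetic: no helper calls, no prior-quarter loop.
--     if not quarter or game_clock_sec is None:
--         return None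
--     if quarter == "OT":
--         return 4 * 900 + max(0, 600 - game_clock_sec)
--     if len(quarter) == 2 and quarter[0] == "Q" and quarter[1] in "1234":
--         q = int(quarter[1])
--         return (q - 1) * 900 + max(0, 900 - game_clock_sec)
--     return None
-- ===== Notes on version B (the rewrite author's own statement) =====
-- stated objective: simpler
-- what changed: Replaces the quarter_order/quarter_duration helper machinery and the prior-quarter accumulation loop with a single direct arithmetic computation per case (OT, Q1-Q4), using the closed form (q-1)*900 for prior quarters.
import Mathlib
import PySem

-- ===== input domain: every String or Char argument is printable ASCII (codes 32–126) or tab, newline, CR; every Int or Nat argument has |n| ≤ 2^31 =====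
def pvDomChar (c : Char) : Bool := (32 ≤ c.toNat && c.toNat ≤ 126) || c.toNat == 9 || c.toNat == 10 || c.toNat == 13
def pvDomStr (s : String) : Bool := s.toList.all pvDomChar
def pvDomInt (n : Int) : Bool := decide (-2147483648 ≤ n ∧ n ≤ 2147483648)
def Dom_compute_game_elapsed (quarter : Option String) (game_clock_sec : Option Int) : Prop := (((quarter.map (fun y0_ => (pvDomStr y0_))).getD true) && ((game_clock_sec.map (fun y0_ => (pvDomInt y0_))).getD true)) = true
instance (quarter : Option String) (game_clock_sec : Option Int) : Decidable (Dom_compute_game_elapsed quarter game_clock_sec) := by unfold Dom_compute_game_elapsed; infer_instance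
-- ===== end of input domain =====

-- B replaces A's quarter_order/duration helpers and prior-quarter loop with one direct arithmetic case split (simpler).


-- ===== PORT A =====
-- quarter_order; int(quarter[1]) ported by hand as digit value (exact: the guard ensures quarter[1] ∈ "1234")
def pvQuarterOrder (q : String) : Int :=
  if q = "OT" then 5
  else if q ≠ "" ∧ PySem.Str.startswith q "Q" = true ∧ PySem.Str.len q = 2 ∧
          ((PySem.Str.pyGet? q 1).getD ' ') ∈ ['1', '2', '3', '4']
  then (((PySem.Str.pyGet? q 1).getD ' ').toNat : Int) - 48
  else 0

def pvQuarterDurationSeconds (q : String) : Int :=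
  if q = "OT" then 10 * 60 else 15 * 60

def compute_game_elapsed (quarter : Option String) (game_clock_sec : Option Int) : Option Int :=
  match quarter, game_clock_sec with
  | some q, some g =>
    if q = "" then none
    else
      let qIdx := pvQuarterOrder q
      if qIdx = 0 then none
      else
        let elapsedPrior := (PySem.List.pyRange 1 qIdx 1).foldl
          (fun acc i => acc + pvQuarterDurationSeconds ("Q" ++ PySem.Int.toStr i)) 0
        let elapsedThis := pvQuarterDurationSeconds q - g
        some (elapsedPrior + max 0 elapsedThis)
  | _, _ => none

-- ===== PORT B =====
def compute_game_elapsed_alt (quarter : Option String) (game_clock_sec : Option Int) : Option Int :=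
  quarter.bind fun q =>
    game_clock_sec.bind fun g =>
      if q = "" then none
      else if q = "OT" then some (4 * 900 + max 0 (600 - g))
      else if PySem.Str.len q = 2 ∧ PySem.Str.pyGet? q 0 = some 'Q' ∧
              ((PySem.Str.pyGet? q 1).getD ' ') ∈ ['1', '2', '3', '4']
      then
        -- int(quarter[1]) as digit value (exact: the guard ensures a digit)
        let qd : Int := (((PySem.Str.pyGet? q 1).getD ' ').toNat : Int) - 48
        some ((qd - 1) * 900 + max 0 (900 - g))
      else none

-- ===== PRECONDITION & SPEC =====
def Spec_compute_game_elapsed (quarter : Option String) (game_clock_sec : Option Int) (out : Option Int) : Prop := out = compute_game_elapsed_alt quarter game_clock_sec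
instance (quarter : Option String) (game_clock_sec : Option Int) (out : Option Int) : Decidable (Spec_compute_game_elapsed quarter game_clock_sec out) := by unfold Spec_compute_game_elapsed; infer_instance

-- ===== CLAIM (what is proved, stated in full; the proofs are below) =====
def Claim_equal_compute_game_elapsed : Prop := ∀ (quarter : Option String) (game_clock_sec : Option Int), Dom_compute_game_elapsed quarter game_clock_sec → Spec_compute_game_elapsed quarter game_clock_sec (compute_game_elapsed quarter game_clock_sec)

-- ===== LEMMAS AND PROOFS =====

-- prior-quarter fold evaluated at each reachable q_idx (closed terms)
theorem pvFold5 : (PySem.List.pyRange 1 5 1).foldl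
    (fun acc i => acc + if "Q" ++ PySem.Int.toStr i = "OT" then (600:Int) else 900) 0 = 3600 := by decide

theorem pv_get1 (q : String) (a b : Char) (h : q.toList = [a, b]) :
    PySem.Str.pyGet? q 1 = some b := by
  simp [PySem.Str.pyGet?_eq, h, PySem.Chars.pyGet?_eq_listPyGet?, PySem.List.pyGet?, PySem.List.pyIdx?]

theorem pv_get0 (q : String) (a b : Char) (h : q.toList = [a, b]) :
    PySem.Str.pyGet? q 0 = some a := by
  simp [PySem.Str.pyGet?_eq, h, PySem.Chars.pyGet?_eq_listPyGet?, PySem.List.pyGet?, PySem.List.pyIdx?]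

theorem pv_sw (q : String) (a b : Char) (h : q.toList = [a, b]) (ha : a = 'Q') :
    PySem.Str.startswith q "Q" = true := by
  rw [PySem.Str.startswith_eq, h, ha]
  simp [PySem.Chars.startswith]

theorem pv_sw_head (q : String) (a b : Char) (h : q.toList = [a, b])
    (hsw : PySem.Str.startswith q "Q" = true) : a = 'Q' := by
  rw [PySem.Str.startswith_eq, h] at hsw
  have hq : 'Q' = a := by simpa [PySem.Chars.startswith] using hsw
  exact hq.symm

theorem pv_len2 (q : String) (hlen : PySem.Str.len q = 2) : ∃ a b, q.toList = [a, b] := by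
  refine List.length_eq_two.mp ?_
  have : (q.toList.length : Int) = 2 := by simpa using hlen
  exact_mod_cast this

-- for q ≠ "OT", A's quarter_order guard coincides with B's guard
theorem pv_guard_iff (q : String) :
    (q ≠ "" ∧ PySem.Str.startswith q "Q" = true ∧ PySem.Str.len q = 2 ∧
      ((PySem.Str.pyGet? q 1).getD ' ') ∈ ['1', '2', '3', '4']) ↔
    (PySem.Str.len q = 2 ∧ PySem.Str.pyGet? q 0 = some 'Q' ∧
      ((PySem.Str.pyGet? q 1).getD ' ') ∈ ['1', '2', '3', '4']) := by
  constructor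
  · rintro ⟨hne, hsw, hlen, hdig⟩
    obtain ⟨a, b, hl⟩ := pv_len2 q hlen
    have ha := pv_sw_head q a b hl hsw
    exact ⟨hlen, by rw [pv_get0 q a b hl, ha], hdig⟩
  · rintro ⟨hlen, h0, hdig⟩
    obtain ⟨a, b, hl⟩ := pv_len2 q hlen
    have ha : a = 'Q' := by
      rw [pv_get0 q a b hl] at h0
      simpa using h0
    refine ⟨?_, pv_sw q a b hl ha, hlen, hdig⟩
    intro hq
    rw [hq] at hl
    simp at hl

theorem main_lemma : ∀ (q : String) (g : Int),
    compute_game_elapsed (some q) (some g) = compute_game_elapsed_alt (some q) (some g) := by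
  intro q g
  by_cases hE : q = ""
  · subst hE; rfl
  by_cases hOT : q = "OT"
  · subst hOT
    simp only [compute_game_elapsed, compute_game_elapsed_alt, Option.bind_some,
      pvQuarterOrder, pvQuarterDurationSeconds, if_neg hE]
    norm_num [pvFold5]
  · by_cases hG : (PySem.Str.len q = 2 ∧ PySem.Str.pyGet? q 0 = some 'Q' ∧
        ((PySem.Str.pyGet? q 1).getD ' ') ∈ ['1', '2', '3', '4'])
    · have hA : q ≠ "" ∧ PySem.Str.startswith q "Q" = true ∧ PySem.Str.len q = 2 ∧
          ((PySem.Str.pyGet? q 1).getD ' ') ∈ ['1', '2', '3', '4'] :=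
        (pv_guard_iff q).mpr hG
      obtain ⟨a, b, hl⟩ := pv_len2 q hG.1
      have hb : b = '1' ∨ b = '2' ∨ b = '3' ∨ b = '4' := by
        have := hG.2.2
        rw [pv_get1 q a b hl] at this
        simpa using this
      have hQO : pvQuarterOrder q = (b.toNat : Int) - 48 := by
        unfold pvQuarterOrder
        rw [if_neg hOT, if_pos hA, pv_get1 q a b hl]
        simp
      simp only [compute_game_elapsed, compute_game_elapsed_alt, Option.bind_some,
        if_neg hE, if_neg hOT, if_pos hG, hQO]
      rw [pv_get1 q a b hl]
      simp only [Option.getD_some, pvQuarterDurationSeconds, if_neg hOT]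
      rcases hb with hb | hb | hb | hb <;> subst hb <;> norm_num <;> decide
    · have hA : ¬ (q ≠ "" ∧ PySem.Str.startswith q "Q" = true ∧ PySem.Str.len q = 2 ∧
          ((PySem.Str.pyGet? q 1).getD ' ') ∈ ['1', '2', '3', '4']) :=
        fun h => hG ((pv_guard_iff q).mp h)
      have hQ0 : pvQuarterOrder q = 0 := by
        unfold pvQuarterOrder
        rw [if_neg hOT, if_neg hA]
      simp only [compute_game_elapsed, compute_game_elapsed_alt, Option.bind_some,
        if_neg hE, if_neg hOT, if_neg hG, hQ0, if_true]

-- ===== VERDICT (by name: the statement is the Claim_ definition above) =====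
theorem compute_game_elapsed_spec : Claim_equal_compute_game_elapsed := by
  intro quarter gcs _
  unfold Spec_compute_game_elapsed
  match quarter, gcs with
  | none, none => rfl
  | none, some g => rfl
  | some q, none => rfl
  | some q, some g => exact main_lemma q g
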